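-- pv_equiv track=rewrite | github.com/TomLippincott/python | site_scons/emma_tools.py | get_without_case
-- ===== SOURCE A (Python) =====
-- def get_without_case(word, morph):
--     retvals = []
--     for analysis in morph.get(word.lower(), []):
--         morphs = []
--         total = 0
--         for m in analysis:
--             nm = word[total:total + len(m)]
--             if nm != "":
--                 morphs.append(nm)
--                 total += len(nm)
--         retvals.append(morphs)
--     return retvals
-- ===== SOURCE B (Python) =====
-- def _reslice(word, analysis):
--     bounds = [0]
--     for m in analysis:
--         bounds.append(bounds[-1] + len(m))
--     return [p for p in (word[a:b] for a, b in zip(bounds, bounds[1:])) if p]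
--
--
-- def get_without_case(word, morph):
--     return [_reslice(word, analysis) for analysis in morph.get(word.lower(), [])]
-- ===== Notes on version B (the rewrite author's own statement) =====
-- stated objective: alternative
-- what changed: Replaces the conditionally-advanced running offset 'total' inside the inner loop by a precomputed prefix-offset table of morpheme lengths, then produces the pieces in a separate slice-and-filter pass.
import Mathlib
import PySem

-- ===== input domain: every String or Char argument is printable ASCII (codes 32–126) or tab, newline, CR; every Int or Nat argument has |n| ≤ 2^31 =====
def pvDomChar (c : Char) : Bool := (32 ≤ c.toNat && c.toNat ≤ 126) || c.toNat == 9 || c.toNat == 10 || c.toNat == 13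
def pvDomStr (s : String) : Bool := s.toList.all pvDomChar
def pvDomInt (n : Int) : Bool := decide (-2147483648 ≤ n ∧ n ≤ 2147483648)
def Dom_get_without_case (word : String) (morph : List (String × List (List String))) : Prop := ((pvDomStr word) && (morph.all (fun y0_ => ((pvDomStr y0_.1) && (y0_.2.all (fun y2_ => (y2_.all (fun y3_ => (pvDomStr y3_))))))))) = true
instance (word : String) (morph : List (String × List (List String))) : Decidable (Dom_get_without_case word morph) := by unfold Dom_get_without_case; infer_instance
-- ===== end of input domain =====

-- B re-implements A by a different decomposition: a precomputed prefix-offset table then one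
-- slice-and-filter pass per analysis, instead of A's conditionally-advanced running total.

-- ===== PORT A =====
-- Literal transliteration of A: outer loop over morph.get(word.lower(), []),
-- inner loop carrying (morphs, total), appending only non-empty slices.
def get_without_case (word : String) (morph : List (String × List (List String))) : List (List String) :=
  (PySem.Dict.getD (PySem.Dict.mk morph) (PySem.Str.lower word) []).foldl
    (fun retvals analysis =>
      let st := analysis.foldl
        (fun (p : List String × Int) m =>
          let nm := PySem.Str.slice word (some p.2) (some (p.2 + PySem.Str.len m))
          if nm ≠ "" then (p.1 ++ [nm], p.2 + PySem.Str.len nm) else p)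
        ([], (0 : Int))
      retvals ++ [st.1])
    []

-- ===== PORT B =====
-- Transliteration of Source B's _reslice: build the offset table `bounds`,
-- then slice word at each consecutive pair and keep the non-empty pieces.
def pvReslice (word : String) (analysis : List String) : List String :=
  let bounds : List Int :=
    analysis.foldl (fun bs m => bs ++ [PySem.List.pyGetD bs (-1) 0 + PySem.Str.len m]) [0]
  ((bounds.zip (bounds.drop 1)).map
      (fun ab => PySem.Str.slice word (some ab.1) (some ab.2))).filter
    (fun p => decide (p ≠ ""))

def get_without_case_alt (word : String) (morph : List (String × List (List String))) : List (List String) :=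
  (PySem.Dict.getD (PySem.Dict.mk morph) (PySem.Str.lower word) []).map (pvReslice word)

-- ===== PRECONDITION & SPEC =====
def Spec_get_without_case (word : String) (morph : List (String × List (List String))) (out : List (List String)) : Prop := out = get_without_case_alt word morph
instance (word : String) (morph : List (String × List (List String))) (out : List (List String)) : Decidable (Spec_get_without_case word morph out) := by unfold Spec_get_without_case; infer_instance

-- ===== CLAIM (what is proved, stated in full; the proofs are below) =====
def Claim_equal_get_without_case : Prop := ∀ (word : String) (morph : List (String × List (List String))), Dom_get_without_case word morph → Spec_get_without_case word morph (get_without_case word morph)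

-- ===== LEMMAS AND PROOFS =====

-- A's inner-loop step, with the (morphs, total) state.
def pvStepA (word : String) (p : List String × Int) (m : String) : List String × Int :=
  let nm := PySem.Str.slice word (some p.2) (some (p.2 + PySem.Str.len m))
  if nm ≠ "" then (p.1 ++ [nm], p.2 + PySem.Str.len nm) else p

-- B's offset-table step.
def pvStepB (bs : List Int) (m : String) : List Int :=
  bs ++ [PySem.List.pyGetD bs (-1) 0 + PySem.Str.len m]

-- B's slice-and-filter pass over an offset table.
def pvZS (word : String) (bs : List Int) : List String :=
  ((bs.zip (bs.drop 1)).map (fun ab => PySem.Str.slice word (some ab.1) (some ab.2))).filter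
    (fun p => decide (p ≠ ""))

-- Common reference: the pieces produced from offset t, following A's truncating recursion.
def pvChop (word : String) : Nat → List String → List String
  | _, [] => []
  | t, m :: ms =>
    let nm := PySem.Str.slice word (some (t : Int)) (some ((t : Int) + PySem.Str.len m))
    if nm = "" then pvChop word t ms
    else nm :: pvChop word (t + nm.toList.length) ms

-- Ideal offset table starting at t: [t, t + len m1, t + len m1 + len m2, …].
def pvOffs : Int → List String → List Int
  | t, [] => [t]
  | t, m :: ms => t :: pvOffs (t + PySem.Str.len m) ms

theorem pvStr_toList_eq_nil (s : String) : s.toList = [] ↔ s = "" := by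
  rw [show ([] : List Char) = "".toList from rfl, String.toList_inj]

theorem pvSlice_toList (word : String) (t lm : Nat) :
    (PySem.Str.slice word (some (t : Int)) (some ((t : Int) + (lm : Int)))).toList
      = (word.toList.drop t).take lm := by
  simp [PySem.Str.toList_slice, PySem.Chars.slice_eq_listSlice, PySem.List.slice_natCast_add]

theorem pvChop_nil (word : String) (t : Nat) : pvChop word t [] = [] := rfl

theorem pvChop_cons (word m : String) (ms : List String) (t : Nat) :
    pvChop word t (m :: ms) =
      (if PySem.Str.slice word (some (t : Int)) (some ((t : Int) + PySem.Str.len m)) = ""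
       then pvChop word t ms
       else PySem.Str.slice word (some (t : Int)) (some ((t : Int) + PySem.Str.len m)) ::
         pvChop word (t + (PySem.Str.slice word (some (t : Int)) (some ((t : Int) + PySem.Str.len m))).toList.length) ms) := rfl

theorem pvStepA_neg (word : String) (acc : List String) (t : Int) (m : String)
    (h : PySem.Str.slice word (some t) (some (t + PySem.Str.len m)) = "") :
    pvStepA word (acc, t) m = (acc, t) := by
  simp only [pvStepA, h, ne_eq, not_true_eq_false, if_false]

theorem pvStepA_pos (word : String) (acc : List String) (t : Int) (m : String)
    (h : PySem.Str.slice word (some t) (some (t + PySem.Str.len m)) ≠ "") :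
    pvStepA word (acc, t) m =
      (acc ++ [PySem.Str.slice word (some t) (some (t + PySem.Str.len m))],
       t + PySem.Str.len (PySem.Str.slice word (some t) (some (t + PySem.Str.len m)))) := by
  simp only [pvStepA, h, ne_eq, not_false_eq_true, if_true]

theorem pvLenCast (word m : String) (t : Nat) :
    (t : Int) + PySem.Str.len (PySem.Str.slice word (some (t : Int)) (some ((t : Int) + PySem.Str.len m)))
      = ((t + (PySem.Str.slice word (some (t : Int)) (some ((t : Int) + PySem.Str.len m))).toList.length : Nat) : Int) := by
  rw [PySem.Str.len_eq]; push_cast; ring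

theorem pvA_inner (word : String) :
    ∀ (ms : List String) (acc : List String) (t : Nat),
      (ms.foldl (pvStepA word) (acc, (t : Int))).1 = acc ++ pvChop word t ms := by
  intro ms
  induction ms with
  | nil => intro acc t; simp [pvChop_nil]
  | cons m ms ih =>
    intro acc t
    rw [List.foldl_cons]
    by_cases h : PySem.Str.slice word (some (t : Int)) (some ((t : Int) + PySem.Str.len m)) = ""
    · rw [pvStepA_neg word acc _ m h, ih, pvChop_cons, if_pos h]
    · rw [pvStepA_pos word acc _ m h, pvLenCast word m t, ih, pvChop_cons, if_neg h,
        List.append_assoc, List.singleton_append]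

theorem pvA_outer (word : String) :
    ∀ (l : List (List String)) (acc : List (List String)),
      l.foldl (fun retvals analysis =>
          retvals ++ [(List.foldl (pvStepA word) ([], (0 : Int)) analysis).1]) acc
        = acc ++ l.map (fun analysis => (List.foldl (pvStepA word) ([], (0 : Int)) analysis).1) := by
  intro l
  induction l with
  | nil => simp
  | cons a l ih => intro acc; simp [List.foldl_cons, ih]

theorem pvBounds_eq : ∀ (ms : List String) (bs : List Int) (h : bs ≠ []),
    ms.foldl pvStepB bs = bs.dropLast ++ pvOffs (bs.getLast h) ms := by
  intro ms
  induction ms with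
  | nil => intro bs h; simp [pvOffs, List.dropLast_append_getLast]
  | cons m ms ih =>
    intro bs h
    rw [List.foldl_cons]
    have hstep : pvStepB bs m = bs ++ [bs.getLast h + PySem.Str.len m] := by
      simp only [pvStepB, PySem.List.pyGetD_neg_one bs 0 h]
    rw [hstep, ih (bs ++ [bs.getLast h + PySem.Str.len m]) (by simp)]
    have h1 : (bs ++ [bs.getLast h + PySem.Str.len m]).dropLast = bs := by simp
    have h2 : (bs ++ [bs.getLast h + PySem.Str.len m]).getLast (by simp) =
        bs.getLast h + PySem.Str.len m := by simp
    rw [h1, h2]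
    show bs ++ pvOffs (bs.getLast h + PySem.Str.len m) ms
        = bs.dropLast ++ pvOffs (bs.getLast h) (m :: ms)
    rw [show pvOffs (bs.getLast h) (m :: ms)
          = bs.getLast h :: pvOffs (bs.getLast h + PySem.Str.len m) ms from rfl,
      ← List.singleton_append, ← List.append_assoc, List.dropLast_append_getLast]

theorem pvOffs_shape (t : Int) (ms : List String) : ∃ r, pvOffs t ms = t :: r := by
  cases ms <;> exact ⟨_, rfl⟩

theorem pvZS_single (word : String) (u : Int) : pvZS word [u] = [] := by
  simp [pvZS]

theorem pvZS_cons (word : String) (a b : Int) (r : List Int) :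
    pvZS word (a :: b :: r) =
      (if PySem.Str.slice word (some a) (some b) = ""
       then pvZS word (b :: r)
       else PySem.Str.slice word (some a) (some b) :: pvZS word (b :: r)) := by
  simp only [pvZS, List.drop_succ_cons, List.drop_zero, List.zip_cons_cons, List.map_cons,
    List.filter_cons]
  by_cases h : PySem.Str.slice word (some a) (some b) = "" <;> simp [h]

theorem pvChop_ge (word : String) : ∀ (ms : List String) (t : Nat),
    word.toList.length ≤ t → pvChop word t ms = [] := by
  intro ms
  induction ms with
  | nil => intro t _; rfl
  | cons m ms ih =>
    intro t ht
    have hnm : PySem.Str.slice word (some (t : Int)) (some ((t : Int) + PySem.Str.len m)) = "" := by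
      rw [← pvStr_toList_eq_nil, PySem.Str.len_eq, pvSlice_toList,
        List.drop_eq_nil_iff.mpr ht, List.take_nil]
    rw [pvChop_cons, if_pos hnm, ih t ht]

theorem pvZS_ge (word : String) : ∀ (ms : List String) (t : Nat),
    word.toList.length ≤ t → pvZS word (pvOffs (t : Int) ms) = [] := by
  intro ms
  induction ms with
  | nil => intro t _; exact pvZS_single word _
  | cons m ms ih =>
    intro t ht
    have hcast : (t : Int) + PySem.Str.len m = ((t + m.toList.length : Nat) : Int) := by
      rw [PySem.Str.len_eq]; push_cast; ring
    obtain ⟨r, hr⟩ := pvOffs_shape ((t : Int) + PySem.Str.len m) ms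
    have hnm : PySem.Str.slice word (some (t : Int)) (some ((t : Int) + PySem.Str.len m)) = "" := by
      rw [← pvStr_toList_eq_nil, PySem.Str.len_eq, pvSlice_toList,
        List.drop_eq_nil_iff.mpr ht, List.take_nil]
    rw [show pvOffs (t : Int) (m :: ms) = (t : Int) :: pvOffs ((t : Int) + PySem.Str.len m) ms from rfl,
      hr, pvZS_cons, if_pos (by rwa [hcast] at hnm ⊢), ← hr, hcast]
    exact ih (t + m.toList.length) (by omega)

theorem pvZS_offs (word : String) : ∀ (ms : List String) (t : Nat),
    t ≤ word.toList.length → pvZS word (pvOffs (t : Int) ms) = pvChop word t ms := by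
  intro ms
  induction ms with
  | nil => intro t _; exact pvZS_single word _
  | cons m ms ih =>
    intro t ht
    have hcast : (t : Int) + PySem.Str.len m = ((t + m.toList.length : Nat) : Int) := by
      rw [PySem.Str.len_eq]; push_cast; ring
    obtain ⟨r, hr⟩ := pvOffs_shape ((t : Int) + PySem.Str.len m) ms
    have htl : (PySem.Str.slice word (some (t : Int)) (some ((t : Int) + PySem.Str.len m))).toList
        = (word.toList.drop t).take m.toList.length := by
      rw [PySem.Str.len_eq, pvSlice_toList]
    rw [show pvOffs (t : Int) (m :: ms) = (t : Int) :: pvOffs ((t : Int) + PySem.Str.len m) ms from rfl,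
      hr, pvZS_cons, ← hr, pvChop_cons]
    by_cases h : PySem.Str.slice word (some (t : Int)) (some ((t : Int) + PySem.Str.len m)) = ""
    · rw [if_pos h, if_pos h]
      have hemp : (word.toList.drop t).take m.toList.length = [] := by
        rw [← htl, h]; rfl
      rcases List.take_eq_nil_iff.mp hemp with h0 | hdr
      · -- zero-length morpheme: next offset is t again
        rw [hcast, h0]
        simpa using ih t ht
      · -- word exhausted: both sides are empty
        have hge : word.toList.length ≤ t := List.drop_eq_nil_iff.mp hdr
        rw [hcast, pvZS_ge word ms (t + m.toList.length) (by omega), pvChop_ge word ms t hge]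
    · rw [if_neg h, if_neg h]
      have hlen : (PySem.Str.slice word (some (t : Int)) (some ((t : Int) + PySem.Str.len m))).toList.length
          = min m.toList.length (word.toList.length - t) := by
        rw [htl, List.length_take, List.length_drop]
      by_cases hle : t + m.toList.length ≤ word.toList.length
      · have hlen' : (PySem.Str.slice word (some (t : Int)) (some ((t : Int) + PySem.Str.len m))).toList.length
            = m.toList.length := by omega
        rw [hlen', hcast, ih (t + m.toList.length) hle]
      · have hlen' : t + (PySem.Str.slice word (some (t : Int)) (some ((t : Int) + PySem.Str.len m))).toList.length
            = word.toList.length := by omega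
        rw [hlen', hcast, pvZS_ge word ms (t + m.toList.length) (by omega),
          pvChop_ge word ms word.toList.length (by omega)]

theorem pvReslice_eq_chop (word : String) (analysis : List String) :
    pvReslice word analysis = pvChop word 0 analysis := by
  show pvZS word (analysis.foldl pvStepB [0]) = pvChop word 0 analysis
  rw [pvBounds_eq analysis [0] (by simp)]
  simpa using pvZS_offs word analysis 0 (Nat.zero_le _)

-- ===== VERDICT (by name: the statement is the Claim_ definition above) =====
theorem get_without_case_spec : Claim_equal_get_without_case := by
  intro word morph _
  show get_without_case word morph = get_without_case_alt word morph
  show (PySem.Dict.getD (PySem.Dict.mk morph) (PySem.Str.lower word) []).foldl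
      (fun retvals analysis => retvals ++ [(analysis.foldl (pvStepA word) ([], (0 : Int))).1]) []
    = (PySem.Dict.getD (PySem.Dict.mk morph) (PySem.Str.lower word) []).map (pvReslice word)
  rw [pvA_outer word _ [], List.nil_append]
  refine List.map_congr_left ?_
  intro a _
  have h0 : ((0 : Nat) : Int) = (0 : Int) := by norm_num
  have := pvA_inner word a [] 0
  rw [h0] at this
  rw [this, List.nil_append, pvReslice_eq_chop]
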